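-- pv_equiv track=rewrite | github.com/theanh11112/AI-For-meeting | backend/app/services/speaker_mapper.py | merge_action_items
-- ===== SOURCE A (Python) =====
-- from typing import Dict, List, Optional
--
-- def merge_action_items(items_list: List[List[dict]]) -> List[dict]:
--     """
--     Merge action items từ nhiều chunks lại với nhau
--
--     Args:
--         items_list: List các list action items từ mỗi chunk
--
--     Returns:
--         List merged action items (đã deduplicate)
--     """
--     merged = {}
--
--     for items in items_list:
--         for item in items:
--             task_key = item.get("task", "").lower().strip()
--
--             if task_key not in merged:
--                 merged[task_key] = item
--             else:
--                 # Merge hoặc lấy phiên bản có nhiều thông tin hơn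
--                 existing = merged[task_key]
--                 if not existing.get("context") and item.get("context"):
--                     existing["context"] = item["context"]
--                 if not existing.get("instructions") and item.get("instructions"):
--                     existing["instructions"] = item["instructions"]
--                 if not existing.get("deadline") and item.get("deadline"):
--                     existing["deadline"] = item["deadline"]
--                 if not existing.get("priority") and item.get("priority"):
--                     existing["priority"] = item["priority"]
--
--     return list(merged.values())
-- ===== SOURCE B (Python) =====
-- def merge_action_items(items_list):
--     """Group-then-fold rewrite: bucket items by task key in one pass, then
--     backfill each group's first item from the rest. Mutates the first item of
--     each group in place, exactly like the original."""
--     groups = {}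
--     for items in items_list:
--         for item in items:
--             task_key = item.get("task", "").lower().strip()
--             groups.setdefault(task_key, []).append(item)
--     result = []
--     for group in groups.values():
--         base = group[0]
--         for item in group[1:]:
--             for field in ("context", "instructions", "deadline", "priority"):
--                 if not base.get(field) and item.get(field):
--                     base[field] = item[field]
--         result.append(base)
--     return result
-- ===== Notes on version B (the rewrite author's own statement) =====
-- stated objective: alternative
-- what changed: Replaces the inline conditional merge-into-dict with a two-phase group-then-fold: first bucket items by task key preserving first-appearance order, then fold each group's tail into its first item, looping over the four field names instead of four hand-written if statements.
import Mathlib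
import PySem

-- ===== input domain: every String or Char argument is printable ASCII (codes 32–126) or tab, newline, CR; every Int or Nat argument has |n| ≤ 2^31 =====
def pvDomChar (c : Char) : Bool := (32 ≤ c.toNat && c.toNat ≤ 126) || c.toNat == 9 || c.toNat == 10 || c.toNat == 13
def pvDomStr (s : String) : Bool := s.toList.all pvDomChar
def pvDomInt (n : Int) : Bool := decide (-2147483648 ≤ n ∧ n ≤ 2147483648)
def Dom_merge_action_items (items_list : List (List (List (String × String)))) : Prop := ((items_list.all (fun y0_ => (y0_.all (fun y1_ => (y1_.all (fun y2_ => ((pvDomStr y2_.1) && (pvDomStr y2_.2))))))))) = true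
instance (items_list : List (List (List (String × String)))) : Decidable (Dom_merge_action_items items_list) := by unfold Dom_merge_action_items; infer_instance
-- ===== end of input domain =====

-- B replaces A's inline conditional merge with a group-by-key pass followed by a per-group
-- backfill fold (objective: alternative decomposition, same cost). Both Pythons mutate the
-- first item of each key group in place; the equivalence proved here is about the return value.


-- ===== PORT A =====
-- item.get(f, "") on a dict-as-assoc-list (first match)
def pvItemGet (item : List (String × String)) (f : String) : String :=
  (PySem.Dict.mk item).getD f ""

-- task_key = item.get("task", "").lower().strip()
def pvKey (item : List (String × String)) : String :=
  PySem.Str.strip (PySem.Str.lower (pvItemGet item "task"))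

-- the Python statement «if not base.get(f) and item.get(f): base[f] = item[f]»
-- (a truthy string value is exactly a non-empty one; base[f] = v is Dict.insert)
def pvBackfill (base item : List (String × String)) (f : String) : List (String × String) :=
  if (pvItemGet base f == "") && !(pvItemGet item f == "") then
    ((PySem.Dict.mk base).insert f (pvItemGet item f)).items
  else base

def merge_action_items (items_list : List (List (List (String × String)))) : List (List (String × String)) :=
  (items_list.foldl (fun merged items =>
      items.foldl (fun merged item =>
          if merged.contains (pvKey item) = false then
            merged.insert (pvKey item) item
          else
            merged.insert (pvKey item)
              (pvBackfill (pvBackfill (pvBackfill (pvBackfill (merged.getD (pvKey item) [])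
                item "context") item "instructions") item "deadline") item "priority"))
        merged)
    PySem.Dict.empty).values

-- ===== PORT B =====
-- base = group[0]; for item in group[1:]: for field in (...): backfill
def pvCollapse (group : List (List (String × String))) : List (String × String) :=
  match group with
  | [] => []
  | base :: rest =>
      rest.foldl (fun base item =>
        ["context", "instructions", "deadline", "priority"].foldl
          (fun b f => pvBackfill b item f) base) base

def merge_action_items_alt (items_list : List (List (List (String × String)))) : List (List (String × String)) :=
  (items_list.foldl (fun groups items =>
      items.foldl (fun groups item =>
          groups.modify (pvKey item) [] (fun grp => grp ++ [item]))
        groups)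
    PySem.Dict.empty).values.map pvCollapse

-- ===== PRECONDITION & SPEC =====
def Spec_merge_action_items (items_list : List (List (List (String × String)))) (out : List (List (String × String))) : Prop := out = merge_action_items_alt items_list
instance (items_list : List (List (List (String × String)))) (out : List (List (String × String))) : Decidable (Spec_merge_action_items items_list out) := by unfold Spec_merge_action_items; infer_instance

-- ===== CLAIM (what is proved, stated in full; the proofs are below) =====
def Claim_equal_merge_action_items : Prop := ∀ (items_list : List (List (List (String × String)))), Dom_merge_action_items items_list → Spec_merge_action_items items_list (merge_action_items items_list)

-- ===== LEMMAS AND PROOFS =====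

-- invariant: A's merged dict is B's groups dict with every group collapsed, and groups are nonempty
def pvRel (m : PySem.Dict String (List (String × String)))
    (g : PySem.Dict String (List (List (String × String)))) : Prop :=
  m.items = g.items.map (fun p => (p.1, pvCollapse p.2)) ∧ ∀ p ∈ g.items, p.2 ≠ []

lemma pvContains_eq {m : PySem.Dict String (List (String × String))}
    {g : PySem.Dict String (List (List (String × String)))} (h : pvRel m g) (k : String) :
    m.contains k = g.contains k := by
  simp [PySem.Dict.contains, h.1, List.any_map, Function.comp_def]

lemma pvGet?_eq {m : PySem.Dict String (List (String × String))}
    {g : PySem.Dict String (List (List (String × String)))} (h : pvRel m g) (k : String) :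
    m.get? k = (g.get? k).map pvCollapse := by
  simp [PySem.Dict.get?, h.1, List.find?_map, Function.comp_def, Option.map_map]

lemma pvCollapse_append (gr : List (List (String × String))) (hne : gr ≠ [])
    (item : List (String × String)) :
    pvCollapse (gr ++ [item]) =
      pvBackfill (pvBackfill (pvBackfill (pvBackfill (pvCollapse gr)
        item "context") item "instructions") item "deadline") item "priority" := by
  cases gr with
  | nil => exact absurd rfl hne
  | cons b t => simp [pvCollapse, List.foldl_append, List.foldl]

lemma pvStep {m : PySem.Dict String (List (String × String))}
    {g : PySem.Dict String (List (List (String × String)))} (h : pvRel m g)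
    (item : List (String × String)) :
    pvRel
      (if m.contains (pvKey item) = false then
        m.insert (pvKey item) item
      else
        m.insert (pvKey item)
          (pvBackfill (pvBackfill (pvBackfill (pvBackfill (m.getD (pvKey item) [])
            item "context") item "instructions") item "deadline") item "priority"))
      (g.modify (pvKey item) [] (fun grp => grp ++ [item])) := by
  obtain ⟨h1, h2⟩ := h
  by_cases hc : g.contains (pvKey item) = true
  · have hm : m.contains (pvKey item) = true := by
      rw [pvContains_eq ⟨h1, h2⟩]; exact hc
    obtain ⟨gr, hgr⟩ : ∃ gr, g.get? (pvKey item) = some gr := by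
      have := PySem.Dict.contains_eq_isSome_get? (d := g) (k := pvKey item)
      rw [hc] at this
      exact Option.isSome_iff_exists.mp this.symm
    have hgrne : gr ≠ [] := by
      obtain ⟨p, hp, hp2⟩ : ∃ p ∈ g.items, p.2 = gr := by
        have : Option.map (fun x => x.2) (g.items.find? (fun p => p.1 == pvKey item)) = some gr := hgr
        obtain ⟨p, hfind, hp2⟩ := Option.map_eq_some_iff.mp this
        exact ⟨p, List.mem_of_find?_eq_some hfind, hp2⟩
      exact hp2 ▸ h2 p hp
    have hget : m.getD (pvKey item) [] = pvCollapse gr := by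
      simp [PySem.Dict.getD, pvGet?_eq ⟨h1, h2⟩, hgr]
    have hgetg : g.getD (pvKey item) [] = gr := by simp [PySem.Dict.getD, hgr]
    simp only [hm, Bool.true_eq_false, if_false, PySem.Dict.modify, hgetg]
    constructor
    · simp only [PySem.Dict.insert, hm, hc, if_true, h1, List.map_map]
      apply List.map_congr_left
      intro p _
      by_cases hk : (p.1 == pvKey item) = true
      · simp [Function.comp, hk, hget, pvCollapse_append gr hgrne item]
      · simp [Function.comp, hk]
    · intro p hp
      simp only [PySem.Dict.insert, hc, if_true] at hp
      obtain ⟨q, hq, hqe⟩ := List.mem_map.mp hp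
      by_cases hk : (q.1 == pvKey item) = true
      · simp only [hk, if_true] at hqe
        subst hqe; simp
      · simp only [hk] at hqe
        subst hqe; exact h2 q hq
  · have hc' : g.contains (pvKey item) = false := by
      cases e : g.contains (pvKey item) with
      | true => exact absurd e hc
      | false => rfl
    have hm : m.contains (pvKey item) = false := by
      rw [pvContains_eq ⟨h1, h2⟩]; exact hc'
    have hgetg : g.getD (pvKey item) [] = [] :=
      PySem.Dict.getD_of_not_contains _ _ hc'
    simp only [hm, if_true, PySem.Dict.modify, hgetg, List.nil_append]
    constructor
    · simp [PySem.Dict.insert, hm, hc', h1, pvCollapse]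
    · intro p hp
      simp only [PySem.Dict.insert, hc'] at hp
      rcases List.mem_append.mp hp with hin | hin
      · exact h2 p hin
      · simp only [List.mem_singleton] at hin
        subst hin; simp

lemma pvInner (items : List (List (String × String)))
    {m : PySem.Dict String (List (String × String))}
    {g : PySem.Dict String (List (List (String × String)))} (h : pvRel m g) :
    pvRel
      (items.foldl (fun merged item =>
          if merged.contains (pvKey item) = false then
            merged.insert (pvKey item) item
          else
            merged.insert (pvKey item)
              (pvBackfill (pvBackfill (pvBackfill (pvBackfill (merged.getD (pvKey item) [])
                item "context") item "instructions") item "deadline") item "priority")) m)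
      (items.foldl (fun groups item =>
          groups.modify (pvKey item) [] (fun grp => grp ++ [item])) g) := by
  induction items generalizing m g with
  | nil => exact h
  | cons item rest ih => exact ih (pvStep h item)

lemma pvOuter (items_list : List (List (List (String × String))))
    {m : PySem.Dict String (List (String × String))}
    {g : PySem.Dict String (List (List (String × String)))} (h : pvRel m g) :
    pvRel
      (items_list.foldl (fun merged items =>
        items.foldl (fun merged item =>
          if merged.contains (pvKey item) = false then
            merged.insert (pvKey item) item
          else
            merged.insert (pvKey item)
              (pvBackfill (pvBackfill (pvBackfill (pvBackfill (merged.getD (pvKey item) [])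
                item "context") item "instructions") item "deadline") item "priority")) merged) m)
      (items_list.foldl (fun groups items =>
        items.foldl (fun groups item =>
          groups.modify (pvKey item) [] (fun grp => grp ++ [item])) groups) g) := by
  induction items_list generalizing m g with
  | nil => exact h
  | cons items rest ih => exact ih (pvInner items h)

-- ===== VERDICT (by name: the statement is the Claim_ definition above) =====
theorem merge_action_items_spec : Claim_equal_merge_action_items := by
  intro items_list _
  unfold Spec_merge_action_items merge_action_items merge_action_items_alt
  have h := pvOuter items_list (m := PySem.Dict.empty) (g := PySem.Dict.empty)
    ⟨rfl, by intro p hp; simp [PySem.Dict.empty] at hp⟩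
  simp [PySem.Dict.values, h.1, List.map_map, Function.comp]
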